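-- pv_equiv track=rewrite | github.com/andrewshooman/smartroute-ai | router.py | quality_low
-- ===== SOURCE A (Python) =====
-- def quality_low(answer: str) -> bool:
--     """Return True only if weak-confidence markers appear in the first third of the response."""
--     stripped = answer.strip()
--     lower = stripped.lower()
--
--     # Short responses: scan all (a hedge anywhere in a short answer = low quality).
--     # Longer responses: only scan the first 40% — hedges buried at the end don't count.
--     scan_zone = lower if len(lower) < 100 else lower[: int(len(lower) * 0.4)]
--
--     weak_markers = [
--         "i don't know", "i do not know", "not sure",
--         "cannot help with that", "can't help with that",
--         "couldn't find information", "can't find information",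
--         "cannot find information", "i don't have access",
--         "i do not have access", "cannot access", "can't access",
--         "cannot browse", "can't browse", "need to look up",
--         "needs to be looked up", "insufficient context",
--         "i may be wrong", "might be wrong",
--     ]
--     return any(marker in scan_zone for marker in weak_markers)
-- ===== SOURCE B (Python) =====
-- def quality_low(answer: str) -> bool:
--     """Return True only if weak-confidence markers appear in the first portion of the answer.
--
--     Different strategy from A: instead of one full substring search per marker,
--     build a dict indexing the markers by their first character, then make a
--     single left-to-right pass over the scan zone; at each position only the
--     markers starting with that character are tested with a prefix check.
--     """
--     text = answer.strip().lower()
--     # (2 * n) // 5 == int(n * 0.4) for every attainable length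
--     zone = text if len(text) < 100 else text[: (2 * len(text)) // 5]
--
--     markers = [
--         "i don't know", "i do not know", "not sure",
--         "cannot help with that", "can't help with that",
--         "couldn't find information", "can't find information",
--         "cannot find information", "i don't have access",
--         "i do not have access", "cannot access", "can't access",
--         "cannot browse", "can't browse", "need to look up",
--         "needs to be looked up", "insufficient context",
--         "i may be wrong", "might be wrong",
--     ]
--     by_first = {}
--     for m in markers:
--         by_first.setdefault(m[0], []).append(m)
--
--     for i, ch in enumerate(zone):
--         for m in by_first.get(ch, []):
--             if zone.startswith(m, i):
--                 return True
--     return False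
-- ===== Notes on version B (the rewrite author's own statement) =====
-- stated objective: alternative
-- what changed: A runs a separate full substring search over the scan zone for each of the 19 markers; B builds a dict of markers keyed by first character once and makes a single position-major pass over the scan zone, testing at each index only the markers whose first character matches, so the per-marker scans disappear.
import Mathlib
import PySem

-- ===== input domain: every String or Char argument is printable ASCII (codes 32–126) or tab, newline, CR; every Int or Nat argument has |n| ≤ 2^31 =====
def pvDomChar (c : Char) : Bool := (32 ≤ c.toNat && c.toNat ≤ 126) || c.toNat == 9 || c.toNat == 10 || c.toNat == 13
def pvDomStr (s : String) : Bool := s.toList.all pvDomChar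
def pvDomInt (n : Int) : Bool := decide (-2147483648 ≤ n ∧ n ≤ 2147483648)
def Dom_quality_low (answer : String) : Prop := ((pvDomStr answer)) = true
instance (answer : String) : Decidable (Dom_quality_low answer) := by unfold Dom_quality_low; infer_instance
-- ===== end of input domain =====

-- B replaces A's per-marker substring searches by a first-character dict index and a
-- single position-major pass over the scan zone (alternative traversal; identical outputs).

-- ===== PORT A =====
-- int(len(lower) * 0.4) is ported as (2 * len) // 5 — equal for every attainable length
def quality_low (answer : String) : Bool :=
  let stripped := PySem.Str.strip answer
  let lower := PySem.Str.lower stripped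
  let scan_zone :=
    if ((PySem.Str.len lower : Int)) < 100 then lower
    else PySem.Str.slice lower none (some (PySem.Int.floordiv (2 * (PySem.Str.len lower : Int)) 5))
  ["i don't know", "i do not know", "not sure",
   "cannot help with that", "can't help with that",
   "couldn't find information", "can't find information",
   "cannot find information", "i don't have access",
   "i do not have access", "cannot access", "can't access",
   "cannot browse", "can't browse", "need to look up",
   "needs to be looked up", "insufficient context",
   "i may be wrong", "might be wrong"].any
    (fun marker => PySem.Str.isIn marker scan_zone)

-- ===== PORT B =====
def qlMarkers : List String :=
  ["i don't know", "i do not know", "not sure",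
   "cannot help with that", "can't help with that",
   "couldn't find information", "can't find information",
   "cannot find information", "i don't have access",
   "i do not have access", "cannot access", "can't access",
   "cannot browse", "can't browse", "need to look up",
   "needs to be looked up", "insufficient context",
   "i may be wrong", "might be wrong"]

-- m[0]; every marker is nonempty, so the default is never taken
def qlHead (m : String) : Char := m.toList.headD ' '

-- by_first: the Python setdefault(...).append(m) loop is Dict.modify with default []
def qlIndex : PySem.Dict Char (List String) :=
  qlMarkers.foldl (fun d m => d.modify (qlHead m) [] (fun l => l ++ [m])) PySem.Dict.empty

-- the enumerate loop with early return: recursion over the suffixes of the zone;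
-- zone.startswith(m, i) is 'm is a prefix of the current suffix'
def qlScan : List Char → Bool
  | [] => false
  | c :: rest =>
    ((qlIndex.getD c []).any (fun m => PySem.Chars.startswith (c :: rest) m.toList)) || qlScan rest

def quality_low_alt (answer : String) : Bool :=
  let text := PySem.Str.lower (PySem.Str.strip answer)
  let zone :=
    if ((PySem.Str.len text : Int)) < 100 then text.toList
    else text.toList.take ((2 * text.toList.length) / 5)
  qlScan zone

-- ===== PRECONDITION & SPEC =====
def Spec_quality_low (answer : String) (out : Bool) : Prop := out = quality_low_alt answer
instance (answer : String) (out : Bool) : Decidable (Spec_quality_low answer out) := by unfold Spec_quality_low; infer_instance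

-- ===== CLAIM (what is proved, stated in full; the proofs are below) =====
def Claim_equal_quality_low : Prop := ∀ (answer : String), Dom_quality_low answer → Spec_quality_low answer (quality_low answer)

-- ===== LEMMAS AND PROOFS =====

theorem qlMarkers_ne_nil : ∀ m ∈ qlMarkers, m.toList ≠ [] := by decide

theorem mem_qlIndex (c : Char) (m : String) :
    m ∈ qlIndex.getD c [] ↔ m ∈ qlMarkers ∧ qlHead m = c := by
  have h : qlIndex = (qlMarkers.map (fun m => (qlHead m, m))).foldl
      (fun d p => d.modify p.1 [] (fun l => l ++ [p.2])) PySem.Dict.empty := by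
    rw [List.foldl_map]
    rfl
  rw [h, PySem.Dict.getD_foldl_modify_append, PySem.Dict.getD_empty]
  simp [List.mem_filter, List.mem_map]

theorem head_of_prefix {m : String} (hm : m ∈ qlMarkers) {c : Char} {t : List Char}
    (h : m.toList <+: c :: t) : qlHead m = c := by
  have hne := qlMarkers_ne_nil m hm
  obtain ⟨u, hu⟩ := h
  cases hml : m.toList with
  | nil => exact absurd hml hne
  | cons d ms =>
    rw [hml] at hu
    unfold qlHead
    rw [hml]
    simpa using congrArg List.head? hu

theorem qlScan_iff (zs : List Char) : qlScan zs = true ↔ ∃ m ∈ qlMarkers, m.toList <:+: zs := by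
  induction zs with
  | nil =>
    constructor
    · intro h; simp [qlScan] at h
    · rintro ⟨m, hm, h⟩
      exact absurd (List.eq_nil_of_infix_nil h) (qlMarkers_ne_nil m hm)
  | cons c rest ih =>
    simp only [qlScan, Bool.or_eq_true, List.any_eq_true, ih, List.infix_cons_iff]
    constructor
    · rintro (⟨m, hm, hs⟩ | ⟨m, hm, hi⟩)
      · have h1 := (mem_qlIndex c m).1 hm
        exact ⟨m, h1.1, Or.inl ((PySem.Chars.startswith_iff _ _).1 hs)⟩
      · exact ⟨m, hm, Or.inr hi⟩
    · rintro ⟨m, hm, hp | hi⟩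
      · exact Or.inl ⟨m, (mem_qlIndex c m).2 ⟨hm, head_of_prefix hm hp⟩,
          (PySem.Chars.startswith_iff _ _).2 hp⟩
      · exact Or.inr ⟨m, hm, hi⟩

theorem ql_bridge (zone : String) :
    qlMarkers.any (fun m => PySem.Str.isIn m zone) = qlScan zone.toList := by
  rw [Bool.eq_iff_iff, List.any_eq_true, qlScan_iff]
  simp only [PySem.Str.isIn_iff_infix]

theorem ql_zone (text : String) :
    (if ((PySem.Str.len text : Int)) < 100 then text
     else PySem.Str.slice text none
       (some (PySem.Int.floordiv (2 * (PySem.Str.len text : Int)) 5))).toList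
    = (if ((PySem.Str.len text : Int)) < 100 then text.toList
       else text.toList.take ((2 * text.toList.length) / 5)) := by
  have hlen : ((PySem.Str.len text : Int)) = ((text.toList.length : Nat) : Int) := by
    simp [pysem]
  split_ifs with h
  · rfl
  · have hk : PySem.Int.floordiv (2 * (PySem.Str.len text : Int)) 5
        = (((2 * text.toList.length) / 5 : Nat) : Int) := by
      rw [hlen]
      exact_mod_cast PySem.Int.floordiv_natCast (2 * text.toList.length) 5
    rw [hk, PySem.Str.toList_slice]
    simp only [PySem.Chars.slice_eq_listSlice, PySem.List.slice_to_natCast]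

-- ===== VERDICT (by name: the statement is the Claim_ definition above) =====
theorem quality_low_spec : Claim_equal_quality_low := by
  intro answer _
  unfold Spec_quality_low quality_low quality_low_alt
  have hb : ∀ zone : String,
      (["i don't know", "i do not know", "not sure",
        "cannot help with that", "can't help with that",
        "couldn't find information", "can't find information",
        "cannot find information", "i don't have access",
        "i do not have access", "cannot access", "can't access",
        "cannot browse", "can't browse", "need to look up",
        "needs to be looked up", "insufficient context",
        "i may be wrong", "might be wrong"].any
        (fun marker => PySem.Str.isIn marker zone)) = qlScan zone.toList :=
    fun z => ql_bridge z
  simp only [hb]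
  exact congrArg qlScan (ql_zone (PySem.Str.lower (PySem.Str.strip answer)))
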